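-- pv_equiv track=rewrite | github.com/pkusp/online-judge-boosting | kickstart/kickstart-2018-h-b.py | mural
-- ===== SOURCE A (Python) =====
-- def mural(scores):
--     sum = 0
--     hn = len(scores) // 2 + len(scores) % 2
--     for i in range(hn):
--         sum += scores[i]
--     res = sum
--     for i in range(len(scores) - hn):
--         sum = sum - scores[i] + scores[i + hn]
--         res = max(res, sum)
--     return res
-- ===== SOURCE B (Python) =====
-- def mural(scores):
--     pre = [0]
--     for x in scores:
--         pre.append(pre[-1] + x)
--     n = len(scores)
--     hn = n // 2 + n % 2
--     return max(pre[i + hn] - pre[i] for i in range(n - hn + 1))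
-- ===== Notes on version B (the rewrite author's own statement) =====
-- stated objective: alternative
-- what changed: Replaces the incremental sliding-window running sum with a precomputed prefix-sum table and a max over window subtractions pre[i+hn]-pre[i].
import Mathlib
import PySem

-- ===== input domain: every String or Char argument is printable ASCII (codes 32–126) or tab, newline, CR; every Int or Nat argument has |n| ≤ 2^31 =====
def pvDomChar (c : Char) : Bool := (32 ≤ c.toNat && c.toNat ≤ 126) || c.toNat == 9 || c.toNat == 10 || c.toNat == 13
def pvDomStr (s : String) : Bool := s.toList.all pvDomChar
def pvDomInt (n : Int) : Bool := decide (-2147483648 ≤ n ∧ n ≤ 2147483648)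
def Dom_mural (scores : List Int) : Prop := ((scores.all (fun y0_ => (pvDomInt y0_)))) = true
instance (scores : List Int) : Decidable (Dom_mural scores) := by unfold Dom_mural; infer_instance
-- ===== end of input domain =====

-- B builds a prefix-sum table instead of A's incremental running-sum slide; alternative decomposition, same O(n) cost.

-- ===== PORT A =====
-- A: running sum of the first hn elements, then slide the window, keeping the max.
def mural (scores : List Int) : Int :=
  let hn : Nat := scores.length / 2 + scores.length % 2
  let sum : Int := (List.range hn).foldl (fun s i => s + scores.getD i 0) 0
  let st : Int × Int :=
    (List.range (scores.length - hn)).foldl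
      (fun (st : Int × Int) i =>
        let s := st.1 - scores.getD i 0 + scores.getD (i + hn) 0
        (s, max st.2 s)) (sum, sum)
  st.2

-- ===== PORT B =====
-- B: build the prefix-sum list (pre.append(pre[-1] + x)), then max of pre[i+hn] - pre[i].
def mural_alt (scores : List Int) : Int :=
  let pre : List Int := scores.foldl (fun acc x => acc ++ [acc.getLastD 0 + x]) [0]
  let n := scores.length
  let hn : Nat := n / 2 + n % 2
  let vals := (List.range (n - hn + 1)).map (fun i => pre.getD (i + hn) 0 - pre.getD i 0)
  match vals with
  | [] => 0           -- unreachable: n - hn + 1 ≥ 1, matching Python's nonempty max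
  | v :: vs => vs.foldl max v

-- ===== PRECONDITION & SPEC =====
def Spec_mural (scores : List Int) (out : Int) : Prop := out = mural_alt scores
instance (scores : List Int) (out : Int) : Decidable (Spec_mural scores out) := by unfold Spec_mural; infer_instance

-- ===== CLAIM (what is proved, stated in full; the proofs are below) =====
def Claim_equal_mural : Prop := ∀ (scores : List Int), Dom_mural scores → Spec_mural scores (mural scores)

-- ===== LEMMAS AND PROOFS =====

-- window sum S l hn i = sum of l[i .. i+hn)
def pvS (l : List Int) (hn i : Nat) : Int := (l.take (i + hn)).sum - (l.take i).sum

theorem sum_take_succ (l : List Int) (k : Nat) (hk : k < l.length) :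
    (l.take (k + 1)).sum = (l.take k).sum + l.getD k 0 := by
  induction l generalizing k with
  | nil => simp at hk
  | cons a t ih =>
    cases k with
    | zero => simp
    | succ m =>
      simp only [List.take_succ_cons, List.sum_cons, List.getD_cons_succ]
      rw [ih m (by simpa using hk)]; ring

theorem loop1_eq (l : List Int) (m : Nat) :
    (List.range m).foldl (fun s i => s + l.getD i 0) 0 = (l.take m).sum := by
  induction m with
  | zero => simp
  | succ k ih =>
    rw [List.range_succ, List.foldl_append, ih]
    simp only [List.foldl_cons, List.foldl_nil]
    by_cases hk : k < l.length
    · rw [sum_take_succ l k hk]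
    · push Not at hk
      rw [List.take_of_length_le hk, List.take_of_length_le (le_trans hk (Nat.le_succ k)),
          List.getD_eq_default _ _ (by omega)]
      simp

-- the prefix list built by B's fold
def pvPsums (s : Int) : List Int → List Int
  | [] => []
  | x :: xs => (s + x) :: pvPsums (s + x) xs

theorem pre_fold_eq (l : List Int) (acc : List Int) :
    l.foldl (fun acc x => acc ++ [acc.getLastD 0 + x]) acc
      = acc ++ pvPsums (acc.getLastD 0) l := by
  induction l generalizing acc with
  | nil => simp [pvPsums]
  | cons a t ih =>
    simp only [List.foldl_cons, pvPsums]
    rw [ih]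
    simp

theorem psums_getD (l : List Int) (s : Int) (k : Nat) (hk : k < l.length) :
    (pvPsums s l).getD k 0 = s + (l.take (k + 1)).sum := by
  induction l generalizing s k with
  | nil => simp at hk
  | cons a t ih =>
    cases k with
    | zero => simp [pvPsums]
    | succ m =>
      simp only [pvPsums, List.getD_cons_succ, List.take_succ_cons, List.sum_cons]
      rw [ih (s + a) m (by simpa using hk)]; ring

theorem pre_getD (l : List Int) (k : Nat) (hk : k ≤ l.length) :
    (l.foldl (fun acc x => acc ++ [acc.getLastD 0 + x]) [0]).getD k 0 = (l.take k).sum := by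
  rw [pre_fold_eq]
  cases k with
  | zero => simp
  | succ m =>
    show (pvPsums ([0].getLastD 0) l).getD m 0 = (List.take (m+1) l).sum
    have : ([0] : List Int).getLastD 0 = 0 := rfl
    rw [this, psums_getD l 0 m (by omega)]; simp

theorem loop2_eq (l : List Int) (hn : Nat) (hhn : hn ≤ l.length) (m : Nat)
    (hm : m ≤ l.length - hn) :
    (List.range m).foldl
      (fun (st : Int × Int) i =>
        let s := st.1 - l.getD i 0 + l.getD (i + hn) 0
        (s, max st.2 s)) (pvS l hn 0, pvS l hn 0)
    = (pvS l hn m, (List.range m).foldl (fun r i => max r (pvS l hn (i + 1))) (pvS l hn 0)) := by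
  induction m with
  | zero => simp
  | succ k ih =>
    rw [List.range_succ, List.foldl_append, List.foldl_append, ih (by omega)]
    simp only [List.foldl_cons, List.foldl_nil]
    have hk1 : k < l.length := by omega
    have hk2 : k + hn < l.length := by omega
    have hstep : pvS l hn k - l.getD k 0 + l.getD (k + hn) 0 = pvS l hn (k + 1) := by
      unfold pvS
      rw [show k + 1 + hn = (k + hn) + 1 by ring, sum_take_succ l (k + hn) hk2,
          sum_take_succ l k hk1]
      ring
    rw [hstep]

theorem hn_le (n : Nat) : n / 2 + n % 2 ≤ n := by omega

theorem mural_eq (l : List Int) : mural l = mural_alt l := by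
  unfold mural mural_alt
  simp only []
  set n := l.length with hn_def
  set hn : Nat := n / 2 + n % 2 with hhn_def
  have hhn : hn ≤ n := hn_le n
  -- A side
  rw [loop1_eq l hn]
  have htake0 : ((l.take 0).sum : Int) = 0 := by simp
  have hA : (l.take hn).sum = pvS l hn 0 := by unfold pvS; simp
  rw [hA, loop2_eq l hn hhn (n - hn) (le_refl _)]
  -- B side
  have hmap : (List.range (n - hn + 1)).map
      (fun i =>
        ((l.foldl (fun acc x => acc ++ [acc.getLastD 0 + x]) [0]).getD (i + hn) 0)
          - ((l.foldl (fun acc x => acc ++ [acc.getLastD 0 + x]) [0]).getD i 0))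
      = (List.range (n - hn + 1)).map (fun i => pvS l hn i) := by
    apply List.map_congr_left
    intro i hi
    simp only [List.mem_range] at hi
    rw [pre_getD l (i + hn) (by omega), pre_getD l i (by omega)]
    rfl
  rw [hmap, List.range_succ_eq_map]
  simp only [List.map_cons, List.map_map]
  have h0 : pvS l hn 0 = (l.take hn).sum := by unfold pvS; simp
  rw [List.foldl_map]
  rfl

-- ===== VERDICT (by name: the statement is the Claim_ definition above) =====
theorem mural_spec : Claim_equal_mural := by
  intro scores _
  unfold Spec_mural
  exact mural_eq scores
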